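-- pv_equiv track=rewrite | github.com/KingaBunkowska/Zadania-WDI | Zestaw_4/t_10.py | f
-- ===== SOURCE A (Python) =====
-- def all_1(T, N):
--     for i in range(N):
--         if T[i]==0:
--             return 0
--
--     return 1
--
-- def f(T, N):
--     Col = [0 for _ in range(N)]
--     Row = [0 for _ in range(N)]
--
--     for i in range(N):
--         for j in range(N):
--             if T[i][j] == 0:
--                 Col[i] = 1
--                 Row[j] = 1
--
--     return all_1(Col, N) and all_1(Row, N)
-- ===== SOURCE B (Python) =====
-- def f(T, N):
--     rows_ok = all(any(T[i][j] == 0 for j in range(N)) for i in range(N))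
--     cols_ok = all(any(T[i][j] == 0 for i in range(N)) for j in range(N))
--     return 1 if rows_ok and cols_ok else 0
-- ===== Notes on version B (the rewrite author's own statement) =====
-- stated objective: simpler
-- what changed: Drops the Col/Row marker arrays and the all_1 helper: B directly tests with all/any that every row and every column contains a zero, instead of filling marker tables in a fused pass and scanning them afterwards.
import Mathlib
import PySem

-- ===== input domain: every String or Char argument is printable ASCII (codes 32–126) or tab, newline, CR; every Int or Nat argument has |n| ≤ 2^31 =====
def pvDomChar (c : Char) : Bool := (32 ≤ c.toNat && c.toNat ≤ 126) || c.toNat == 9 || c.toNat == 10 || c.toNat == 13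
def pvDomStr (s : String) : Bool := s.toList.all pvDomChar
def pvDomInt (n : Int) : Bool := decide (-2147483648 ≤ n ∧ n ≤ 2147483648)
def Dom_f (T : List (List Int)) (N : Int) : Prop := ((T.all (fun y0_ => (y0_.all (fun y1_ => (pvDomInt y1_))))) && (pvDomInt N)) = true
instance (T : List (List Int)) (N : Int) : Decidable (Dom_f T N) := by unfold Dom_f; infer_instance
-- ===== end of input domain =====

-- B drops A's Col/Row marker arrays and the all_1 helper and instead tests directly,
-- with all/any, that every row and every column contains a zero (objective: simpler).

-- ===== PORT A =====
-- all_1's loop 'for i in range(N): if T[i]==0: return 0', counted down by n, index k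
def all1Loop (L : List Int) (n k : Nat) : Int :=
  match n with
  | 0 => 1
  | m+1 => if L.getD k 0 = 0 then 0 else all1Loop L m (k+1)

def all_1 (L : List Int) (N : Int) : Int := all1Loop L N.toNat 0

-- inner 'for j in range(N)' of A, mutating Col (C) and Row (R); the in-range
-- indexing T[i][j] (guaranteed by Pre_f) is ported as getD
def fInner (T : List (List Int)) (i : Nat) (C R : List Int) (n j : Nat) : List Int × List Int :=
  match n with
  | 0 => (C, R)
  | m+1 =>
      if (T.getD i []).getD j 0 = 0 then fInner T i (C.set i 1) (R.set j 1) m (j+1)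
      else fInner T i C R m (j+1)

-- outer 'for i in range(N)' of A
def fOuter (T : List (List Int)) (nF : Nat) (C R : List Int) (n i : Nat) : List Int × List Int :=
  match n with
  | 0 => (C, R)
  | m+1 =>
      let CR := fInner T i C R nF 0
      fOuter T nF CR.1 CR.2 m (i+1)

-- 'return all_1(Col, N) and all_1(Row, N)': Python 'and' returns its left operand
-- if it is falsy (0), else the right one
def f (T : List (List Int)) (N : Int) : Int :=
  let n := N.toNat
  let CR := fOuter T n (List.replicate n 0) (List.replicate n 0) n 0
  let a := all_1 CR.1 N
  if a = 0 then a else all_1 CR.2 N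

-- ===== PORT B =====
def f_alt (T : List (List Int)) (N : Int) : Int :=
  let n := N.toNat
  let rows_ok := (List.range n).all fun i => (List.range n).any fun j => (T.getD i []).getD j 0 == 0
  let cols_ok := (List.range n).all fun j => (List.range n).any fun i => (T.getD i []).getD j 0 == 0
  if rows_ok && cols_ok then 1 else 0

-- ===== PRECONDITION & SPEC =====
-- Pre_f: exactly the inputs on which Python A returns normally — indexing T[i][j] for
-- 0 ≤ i, j < N never raises IndexError; for N ≤ 0 all loops are empty, so no constraint.
def Pre_f (T : List (List Int)) (N : Int) : Prop :=
  N.toNat ≤ T.length ∧ ∀ row ∈ T.take N.toNat, N.toNat ≤ row.length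
instance (T : List (List Int)) (N : Int) : Decidable (Pre_f T N) := by unfold Pre_f; infer_instance
def pvWitness_f : List (List Int) × Int := ([[0, 1], [1, 0]], 2)

def Spec_f (T : List (List Int)) (N : Int) (out : Int) : Prop := out = f_alt T N
instance (T : List (List Int)) (N : Int) (out : Int) : Decidable (Spec_f T N out) := by unfold Spec_f; infer_instance

-- ===== CLAIM (what is proved, stated in full; the proofs are below) =====
def Claim_equal_f : Prop := ∀ (T : List (List Int)) (N : Int), Dom_f T N → Pre_f T N → Spec_f T N (f T N)

-- ===== LEMMAS AND PROOFS =====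

lemma getD_set_eq (L : List Int) (i : Nat) (v : Int) (q : Nat) :
    (L.set i v).getD q 0 = if q = i ∧ i < L.length then v else L.getD q 0 := by
  simp only [List.getD, List.getElem?_set]
  split_ifs with h1 h2 h3 h4 <;> simp_all <;> omega

lemma all1Loop_eq (L : List Int) (n : Nat) : ∀ (k : Nat),
    all1Loop L n k = if ∃ t, t < n ∧ L.getD (k+t) 0 = 0 then 0 else 1 := by
  induction n with
  | zero => intro k; simp [all1Loop]
  | succ m ih =>
    intro k
    rw [all1Loop]
    by_cases h : L.getD k 0 = 0
    · rw [if_pos h, if_pos ⟨0, by omega, by simpa using h⟩]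
    · rw [if_neg h, ih]
      congr 1
      apply propext
      constructor
      · rintro ⟨t, ht, he⟩; exact ⟨t+1, by omega, by rw [show k+(t+1) = k+1+t by omega]; exact he⟩
      · rintro ⟨t, ht, he⟩
        match t, ht with
        | 0, _ => simp at he; exact absurd he h
        | t+1, ht => exact ⟨t, by omega, by rw [show k+1+t = k+(t+1) by omega]; exact he⟩

lemma fInner_fst (T : List (List Int)) (i : Nat) (n : Nat) : ∀ (j : Nat) (C R : List Int),
    (fInner T i C R n j).1 =
      if ∃ t, t < n ∧ (T.getD i []).getD (j+t) 0 = 0 then C.set i 1 else C := by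
  induction n with
  | zero => intro j C R; simp [fInner]
  | succ m ih =>
    intro j C R
    rw [fInner]
    by_cases h : (T.getD i []).getD j 0 = 0
    · rw [if_pos h, if_pos (show ∃ t, t < m+1 ∧ (T.getD i []).getD (j+t) 0 = 0 from ⟨0, by omega, by simpa using h⟩), ih]
      split_ifs <;> simp [List.set_set]
    · rw [if_neg h, ih]
      congr 1
      apply propext
      constructor
      · rintro ⟨t, ht, he⟩; exact ⟨t+1, by omega, by rw [show j+(t+1) = j+1+t by omega]; exact he⟩
      · rintro ⟨t, ht, he⟩
        match t, ht with
        | 0, _ => simp at he; exact absurd he h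
        | t+1, ht => exact ⟨t, by omega, by rw [show j+1+t = j+(t+1) by omega]; exact he⟩

lemma fInner_snd_length (T : List (List Int)) (i : Nat) (n : Nat) : ∀ (j : Nat) (C R : List Int),
    ((fInner T i C R n j).2).length = R.length := by
  induction n with
  | zero => intro j C R; simp [fInner]
  | succ m ih =>
    intro j C R
    rw [fInner]
    split_ifs <;> rw [ih] <;> simp

lemma fInner_snd_getD (T : List (List Int)) (i : Nat) (n : Nat) : ∀ (j : Nat) (C R : List Int) (q : Nat),
    ((fInner T i C R n j).2).getD q 0 =
      if j ≤ q ∧ q < j+n ∧ (T.getD i []).getD q 0 = 0 ∧ q < R.length then 1 else R.getD q 0 := by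
  induction n with
  | zero => intro j C R q; simp [fInner]; omega
  | succ m ih =>
    intro j C R q
    rw [fInner]
    by_cases h : (T.getD i []).getD j 0 = 0
    · rw [if_pos h, ih]
      simp only [List.length_set, getD_set_eq]
      by_cases hq : q = j
      · subst hq; split_ifs <;> first | rfl | omega | (exfalso; simp_all; omega)
      · split_ifs <;> first | rfl | omega | (exfalso; simp_all; omega)
    · rw [if_neg h, ih]
      by_cases hq : q = j
      · subst hq; split_ifs <;> first | rfl | omega | (exfalso; simp_all; omega)
      · split_ifs <;> first | rfl | omega | (exfalso; simp_all; omega)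

lemma fOuter_fst_getD (T : List (List Int)) (nF : Nat) (n : Nat) : ∀ (i : Nat) (C R : List Int) (p : Nat),
    ((fOuter T nF C R n i).1).getD p 0 =
      if i ≤ p ∧ p < i+n ∧ (∃ t, t < nF ∧ (T.getD p []).getD t 0 = 0) ∧ p < C.length then 1
      else C.getD p 0 := by
  induction n with
  | zero => intro i C R p; simp [fOuter]; omega
  | succ m ih =>
    intro i C R p
    rw [fOuter]
    rw [ih]
    simp only [fInner_fst, Nat.zero_add, apply_ite List.length, List.length_set, ite_self]
    by_cases hp : p = i
    · subst hp
      rw [if_neg (by omega)]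
      by_cases hEi : ∃ t, t < nF ∧ (T.getD p []).getD t 0 = 0
      · rw [if_pos hEi, getD_set_eq]
        split_ifs with h1 h2 h3 <;> first
          | rfl
          | (exact absurd ⟨by omega, by omega, hEi, h1.2⟩ h2)
          | (exact absurd ⟨rfl, h3.2.2.2⟩ h1)
      · rw [if_neg hEi, if_neg (fun hc => hEi hc.2.2.1)]
    · have hset : (if ∃ t, t < nF ∧ (T.getD i []).getD t 0 = 0 then C.set i 1 else C).getD p 0
          = C.getD p 0 := by
        split_ifs
        · rw [getD_set_eq]; simp [hp]
        · rfl
      rw [hset]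
      congr 1
      apply propext
      constructor <;> rintro ⟨h1, h2, h3, h4⟩ <;> exact ⟨by omega, by omega, h3, h4⟩

lemma fOuter_snd_getD (T : List (List Int)) (nF : Nat) (n : Nat) : ∀ (i : Nat) (C R : List Int) (q : Nat),
    ((fOuter T nF C R n i).2).getD q 0 =
      if q < nF ∧ (∃ p, p < i+n ∧ i ≤ p ∧ (T.getD p []).getD q 0 = 0) ∧ q < R.length then 1
      else R.getD q 0 := by
  induction n with
  | zero =>
    intro i C R q
    rw [fOuter, if_neg]
    rintro ⟨-, ⟨p, hp1, hp2, -⟩, -⟩; omega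
  | succ m ih =>
    intro i C R q
    rw [fOuter, ih]
    simp only [fInner_snd_length, fInner_snd_getD, Nat.zero_add, Nat.zero_le, true_and]
    by_cases hq : q < nF ∧ q < R.length
    · by_cases hgi : (T.getD i []).getD q 0 = 0
      · have hin : (if q < nF ∧ (T.getD i []).getD q 0 = 0 ∧ q < R.length then (1:Int)
            else R.getD q 0) = 1 := if_pos ⟨hq.1, hgi, hq.2⟩
        rw [hin, ite_self, if_pos ⟨hq.1, ⟨i, by omega, by omega, hgi⟩, hq.2⟩]
      · have hin : (if q < nF ∧ (T.getD i []).getD q 0 = 0 ∧ q < R.length then (1:Int)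
            else R.getD q 0) = R.getD q 0 := if_neg (fun hc => hgi hc.2.1)
        rw [hin]
        congr 1
        apply propext
        constructor
        · rintro ⟨h1, ⟨p, hp1, hp2, hp3⟩, h3⟩; exact ⟨h1, ⟨p, by omega, by omega, hp3⟩, h3⟩
        · rintro ⟨h1, ⟨p, hp1, hp2, hp3⟩, h3⟩
          by_cases hpi : p = i
          · subst hpi; exact absurd hp3 hgi
          · exact ⟨h1, ⟨p, by omega, by omega, hp3⟩, h3⟩
    · have hin : (if q < nF ∧ (T.getD i []).getD q 0 = 0 ∧ q < R.length then (1:Int)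
          else R.getD q 0) = R.getD q 0 := if_neg (fun hc => hq ⟨hc.1, hc.2.2⟩)
      rw [hin, if_neg (fun hc => hq ⟨hc.1, hc.2.2⟩), if_neg (fun hc => hq ⟨hc.1, hc.2.2⟩)]

-- main equivalence: both sides reduce to 'every row and every column of the N×N
-- top-left block has a zero entry' (stated with getD, so no precondition is needed)
theorem f_eq_f_alt (T : List (List Int)) (N : Int) : f T N = f_alt T N := by
  have hrep : ∀ t : Nat, (List.replicate N.toNat (0:Int)).getD t 0 = 0 := by
    intro t
    simp [List.getD, List.getElem?_replicate]
    split_ifs <;> rfl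
  have hCol : ∀ t : Nat,
      ((fOuter T N.toNat (List.replicate N.toNat 0) (List.replicate N.toNat 0) N.toNat 0).1).getD t 0
        = if t < N.toNat ∧ ∃ j, j < N.toNat ∧ (T.getD t []).getD j 0 = 0 then 1 else 0 := by
    intro t
    rw [fOuter_fst_getD, hrep]
    simp only [List.length_replicate]
    congr 1
    apply propext
    constructor
    · rintro ⟨-, h2, h3, -⟩; exact ⟨by omega, h3⟩
    · rintro ⟨h1, h2⟩; exact ⟨by omega, by omega, h2, h1⟩
  have hRow : ∀ q : Nat,
      ((fOuter T N.toNat (List.replicate N.toNat 0) (List.replicate N.toNat 0) N.toNat 0).2).getD q 0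
        = if q < N.toNat ∧ ∃ p, p < N.toNat ∧ (T.getD p []).getD q 0 = 0 then 1 else 0 := by
    intro q
    rw [fOuter_snd_getD, hrep]
    simp only [List.length_replicate]
    congr 1
    apply propext
    constructor
    · rintro ⟨h1, ⟨p, hp1, -, hp3⟩, -⟩; exact ⟨h1, p, by omega, hp3⟩
    · rintro ⟨h1, p, hp1, hp2⟩; exact ⟨h1, ⟨p, by omega, by omega, hp2⟩, h1⟩
  have c1 : (∃ t, t < N.toNat ∧
        (if t < N.toNat ∧ (∃ j, j < N.toNat ∧ (T.getD t []).getD j 0 = 0) then (1:Int) else 0) = 0)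
      ↔ ¬ ∀ i, i < N.toNat → ∃ j, j < N.toNat ∧ (T.getD i []).getD j 0 = 0 := by
    constructor
    · rintro ⟨t, ht, he⟩ hall
      rw [if_pos ⟨ht, hall t ht⟩] at he; norm_num at he
    · intro h
      rcases not_forall.1 h with ⟨i, hi⟩
      rcases _root_.not_imp.1 hi with ⟨hi1, hi2⟩
      exact ⟨i, hi1, by rw [if_neg (fun hc => hi2 hc.2)]⟩
  have c2 : (∃ t, t < N.toNat ∧
        (if t < N.toNat ∧ (∃ p, p < N.toNat ∧ (T.getD p []).getD t 0 = 0) then (1:Int) else 0) = 0)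
      ↔ ¬ ∀ j, j < N.toNat → ∃ p, p < N.toNat ∧ (T.getD p []).getD j 0 = 0 := by
    constructor
    · rintro ⟨t, ht, he⟩ hall
      rw [if_pos ⟨ht, hall t ht⟩] at he; norm_num at he
    · intro h
      rcases not_forall.1 h with ⟨j, hj⟩
      rcases _root_.not_imp.1 hj with ⟨hj1, hj2⟩
      exact ⟨j, hj1, by rw [if_neg (fun hc => hj2 hc.2)]⟩
  have b1 : ((List.range N.toNat).all fun i => (List.range N.toNat).any fun j =>
        (T.getD i []).getD j 0 == 0) = true
      ↔ ∀ i, i < N.toNat → ∃ j, j < N.toNat ∧ (T.getD i []).getD j 0 = 0 := by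
    simp [List.all_eq_true, List.any_eq_true, List.mem_range]
  have b2 : ((List.range N.toNat).all fun j => (List.range N.toNat).any fun i =>
        (T.getD i []).getD j 0 == 0) = true
      ↔ ∀ j, j < N.toNat → ∃ p, p < N.toNat ∧ (T.getD p []).getD j 0 = 0 := by
    simp [List.all_eq_true, List.any_eq_true, List.mem_range]
  unfold f f_alt all_1
  simp only []
  rw [all1Loop_eq, all1Loop_eq]
  simp only [Nat.zero_add, hCol, hRow]
  by_cases hRall : ∀ i, i < N.toNat → ∃ j, j < N.toNat ∧ (T.getD i []).getD j 0 = 0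
  · by_cases hCall : ∀ j, j < N.toNat → ∃ p, p < N.toNat ∧ (T.getD p []).getD j 0 = 0
    · rw [if_neg (fun h => (c1.1 h) hRall), if_neg (by norm_num),
        if_neg (fun h => (c2.1 h) hCall),
        if_pos (by rw [Bool.and_eq_true]; exact ⟨b1.2 hRall, b2.2 hCall⟩)]
    · rw [if_neg (fun h => (c1.1 h) hRall), if_neg (by norm_num),
        if_pos (c2.2 hCall),
        if_neg (fun h => hCall (b2.1 ((Bool.and_eq_true _ _).mp h).2))]
  · rw [if_pos (c1.2 hRall), if_pos rfl,
      if_neg (fun h => hRall (b1.1 ((Bool.and_eq_true _ _).mp h).1))]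

-- ===== VERDICT (by name: the statement is the Claim_ definition above) =====
theorem f_spec : Claim_equal_f := by
  intro T N _ _
  unfold Spec_f
  exact f_eq_f_alt T N
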